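-- pv_equiv track=rewrite | github.com/HectorMRC/CDI | Lab3 - Codificación aritmética/03.1_Aritmetica_Entera_practica.py | getTablaFrequencias
-- ===== SOURCE A (Python) =====
-- def getTuple(mensaje, n, start):
--     tupl = ""
--     for index in range(n):
--         position = start + index
--         if position < len(mensaje):
--             tupl += mensaje[position]
--
--     return tupl
--
-- def getTablaFrequencias(mensaje, numero_de_simbolos=1):
--     alfabeto = []
--     frecuencias = []
--     T = len(mensaje)
--
--     total = 0
--     for index in range(T)[::numero_de_simbolos]:
--         total += 1
--         signo = getTuple(mensaje, numero_de_simbolos, index)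
--
--         if signo in alfabeto:
--             i = alfabeto.index(signo)
--             frecuencias[i] += 1
--         else:
--             alfabeto.append(signo)
--             frecuencias.append(1)
--
--     return alfabeto, frecuencias
-- ===== SOURCE B (Python) =====
-- def getTablaFrequencias(mensaje, numero_de_simbolos=1):
--     indices = range(len(mensaje))[::numero_de_simbolos]
--     symbols = [mensaje[i:i+numero_de_simbolos] for i in indices]
--     alfabeto = []
--     for s in symbols:
--         if s not in alfabeto:
--             alfabeto.append(s)
--     frecuencias = [symbols.count(s) for s in alfabeto]
--     return alfabeto, frecuencias
-- ===== Notes on version B (the rewrite author's own statement) =====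
-- stated objective: faster
-- what changed: Replaces the fused count-as-you-go loop (membership test, list.index, in-place increment and char-by-char getTuple concatenation per tuple) with three separate phases: build the full symbol list by direct slicing, dedup it in first-appearance order, then compute each frequency with symbols.count.
-- outside the precondition, e.g. on getTablaFrequencias('\ta', -1): A returns ([''], [2]), B returns (['', '\t'], [1, 1])
import Mathlib
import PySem

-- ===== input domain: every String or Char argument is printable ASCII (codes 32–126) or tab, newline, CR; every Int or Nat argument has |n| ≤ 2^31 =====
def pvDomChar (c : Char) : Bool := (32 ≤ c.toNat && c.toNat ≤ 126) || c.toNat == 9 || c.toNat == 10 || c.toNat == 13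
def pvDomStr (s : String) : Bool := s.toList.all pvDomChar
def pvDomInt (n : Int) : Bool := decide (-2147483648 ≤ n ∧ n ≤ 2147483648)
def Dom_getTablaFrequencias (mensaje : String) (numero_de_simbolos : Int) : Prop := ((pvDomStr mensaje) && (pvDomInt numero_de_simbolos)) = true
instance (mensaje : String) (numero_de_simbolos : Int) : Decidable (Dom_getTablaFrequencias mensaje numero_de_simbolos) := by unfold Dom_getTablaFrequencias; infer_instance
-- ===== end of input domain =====

-- B replaces A's fused count-as-you-go loop by three separate passes (build all symbols by slicing,
-- dedup in first-appearance order, recount with count); equivalence of the return values is proved for tuple lengths ≥ 1.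

-- ===== PORT A =====
def getTuple (mensaje : String) (n : Int) (start : Int) : String :=
  String.ofList ((PySem.List.pyRange 0 n 1).foldl (fun tupl index =>
    let position := start + index
    if position < PySem.Str.len mensaje then
      match PySem.List.pyGet? mensaje.toList position with
      | some c => tupl ++ [c]
      | none => tupl   -- unreachable: 0 ≤ position < len at every call A makes
    else tupl) [])

def getTablaFrequencias (mensaje : String) (numero_de_simbolos : Int) : List String × List Int :=
  let T : Int := PySem.Str.len mensaje
  -- (the dead local 'total' of the Python is omitted: it never reaches the return value)
  match PySem.List.slice? (PySem.List.pyRange 0 T 1) none none numero_de_simbolos with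
  | none => ([], [])   -- numero_de_simbolos = 0: Python raises ValueError here; excluded by Pre_
  | some idxs =>
    idxs.foldl (fun st index =>
      let signo := getTuple mensaje numero_de_simbolos index
      if signo ∈ st.1 then
        match PySem.List.index? st.1 signo with
        | some i => (st.1, st.2.set i (st.2.getD i 0 + 1))
        | none => st   -- unreachable: signo ∈ st.1
      else (st.1 ++ [signo], st.2 ++ [1])) ([], [])

-- ===== PORT B =====
def getTablaFrequencias_alt (mensaje : String) (numero_de_simbolos : Int) : List String × List Int :=
  match PySem.List.slice? (PySem.List.pyRange 0 (PySem.Str.len mensaje) 1) none none numero_de_simbolos with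
  | none => ([], [])   -- numero_de_simbolos = 0: Python raises ValueError here; excluded by Pre_
  | some indices =>
    let symbols := indices.map (fun i => PySem.Str.slice mensaje (some i) (some (i + numero_de_simbolos)))
    let alfabeto := symbols.foldl (fun a s => if s ∈ a then a else a ++ [s]) []
    (alfabeto, alfabeto.map (fun s => (PySem.List.count symbols s : Int)))

-- ===== PRECONDITION & SPEC =====
-- Pre_ excludes numero_de_simbolos = 0 (both Pythons raise ValueError on the zero slice step) and
-- negative numero_de_simbolos, which is outside the natural domain of a tuple length and on which A's
-- value ([''], [#indices]) is an accident of its empty-tuple loop that B does not reproduce.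
def Pre_getTablaFrequencias (mensaje : String) (numero_de_simbolos : Int) : Prop :=
  1 ≤ numero_de_simbolos
instance (mensaje : String) (numero_de_simbolos : Int) : Decidable (Pre_getTablaFrequencias mensaje numero_de_simbolos) := by unfold Pre_getTablaFrequencias; infer_instance

def pvWitness_getTablaFrequencias : String × Int := ("abcab", 2)

def Spec_getTablaFrequencias (mensaje : String) (numero_de_simbolos : Int) (out : List String × List Int) : Prop := out = getTablaFrequencias_alt mensaje numero_de_simbolos
instance (mensaje : String) (numero_de_simbolos : Int) (out : List String × List Int) : Decidable (Spec_getTablaFrequencias mensaje numero_de_simbolos out) := by unfold Spec_getTablaFrequencias; infer_instance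

-- ===== CLAIM (what is proved, stated in full; the proofs are below) =====
def Claim_equal_getTablaFrequencias : Prop := ∀ (mensaje : String) (numero_de_simbolos : Int), Dom_getTablaFrequencias mensaje numero_de_simbolos → Pre_getTablaFrequencias mensaje numero_de_simbolos → Spec_getTablaFrequencias mensaje numero_de_simbolos (getTablaFrequencias mensaje numero_de_simbolos)

-- ===== LEMMAS AND PROOFS =====

-- A's character loop with start i and m trips collects exactly mensaje[i:i+m].
theorem tupleAux (mensaje : String) (i : Int) (hi : 0 ≤ i) (m : Nat) :
    (PySem.List.pyRange 0 (m : Int) 1).foldl (fun tupl index =>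
        let position := i + index
        if position < PySem.Str.len mensaje then
          match PySem.List.pyGet? mensaje.toList position with
          | some c => tupl ++ [c]
          | none => tupl
        else tupl) []
      = (mensaje.toList.drop i.toNat).take m := by
  induction m with
  | zero =>
    rw [show ((0 : Nat) : Int) = 0 from rfl, PySem.List.pyRange_one_eq_nil le_rfl]
    rfl
  | succ m ih =>
    rw [show ((m + 1 : Nat) : Int) = (m : Int) + 1 by push_cast; ring,
        PySem.List.pyRange_one_succ_right (by omega), List.foldl_append, ih, List.take_add_one]
    simp only [List.foldl_cons, List.foldl_nil, PySem.Str.len]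
    have hdrop : (mensaje.toList.drop i.toNat)[m]? = mensaje.toList[i.toNat + m]? :=
      List.getElem?_drop
    by_cases hlt : i + (m : Int) < (mensaje.toList.length : Int)
    · have hleng : i.toNat + m < mensaje.toList.length := by omega
      have h0 : (0 : Int) ≤ i + (m : Int) := by omega
      have ht : (i + (m : Int)).toNat = i.toNat + m := by omega
      have hidx : PySem.List.pyIdx? mensaje.toList.length (i + (m : Int)) =
          some (i.toNat + m) := by
        simp only [PySem.List.pyIdx?]
        rw [if_pos h0, if_pos hlt, ht]
      have hget : PySem.List.pyGet? mensaje.toList (i + (m : Int)) =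
          some (mensaje.toList[i.toNat + m]'hleng) := by
        show (PySem.List.pyIdx? mensaje.toList.length (i + (m : Int))).bind
            (fun k => mensaje.toList[k]?) = _
        rw [hidx]
        simp [List.getElem?_eq_getElem hleng]
      rw [if_pos hlt, hget]
      simp [hdrop, List.getElem?_eq_getElem hleng]
    · rw [if_neg hlt]
      have hnone : mensaje.toList[i.toNat + m]? = none := by
        apply List.getElem?_eq_none; omega
      simp [hdrop, hnone]

-- A's getTuple equals B's slice mensaje[i:i+n] for 0 ≤ i (every index A feeds it) and 0 ≤ n.
theorem getTuple_eq_slice (mensaje : String) (n i : Int) (hi : 0 ≤ i) (hn : 0 ≤ n) :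
    getTuple mensaje n i = PySem.Str.slice mensaje (some i) (some (i + n)) := by
  unfold getTuple PySem.Str.slice
  rw [PySem.Chars.slice_eq_listSlice, PySem.List.slice_toNat mensaje.toList hi (by omega),
      show (i + n).toNat - i.toNat = n.toNat by omega]
  congr 1
  rw [show n = ((n.toNat : Nat) : Int) by omega]
  exact tupleAux mensaje i hi n.toNat

-- B's dedup pass is PySem.List.dedup.
theorem dedup_pass_eq (syms : List String) :
    syms.foldl (fun a s => if s ∈ a then a else a ++ [s]) [] = PySem.List.dedup syms := by
  rw [PySem.List.dedup_eq_ofList, PySem.Set.ofList_eq_foldl]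
  refine PySem.List.foldl_congr_mem syms _ _ _ ?_
  intro acc x _
  by_cases hx : x ∈ acc <;> simp [PySem.Set.add, PySem.Set.contains, hx]

-- Bumping the count at the (unique) position of s in a nodup list is recounting over pfx ++ [s].
theorem set_count_map (pfx : List String) (s : String) (l : List String) (k : Nat)
    (hnd : l.Nodup) (hk : k < l.length) (hkeq : l[k] = s) :
    (l.map (fun t => (PySem.List.count pfx t : Int))).set k
        ((PySem.List.count pfx s : Int) + 1)
      = l.map (fun t => (PySem.List.count (pfx ++ [s]) t : Int)) := by
  apply List.ext_getElem (by simp)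
  intro j h1 h2
  have hj : j < l.length := by simpa using h2
  rw [List.getElem_set]
  simp only [List.getElem_map]
  by_cases hjk : k = j
  · subst hjk
    rw [if_pos rfl, hkeq]
    simp [PySem.List.count_eq, List.count_append]
  · rw [if_neg hjk]
    have hne : ¬ s = l[j] := by
      intro hcontra
      exact hjk ((hnd.getElem_inj_iff).mp (hkeq.trans hcontra))
    simp [PySem.List.count_eq, List.count_append, hne]

-- A's fused loop over any symbol list equals (first-appearance dedup, per-symbol counts).
theorem fused_loop_eq (syms : List String) :
    syms.foldl (fun st signo =>
        if signo ∈ st.1 then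
          match PySem.List.index? st.1 signo with
          | some i => (st.1, st.2.set i (st.2.getD i 0 + 1))
          | none => st
        else (st.1 ++ [signo], st.2 ++ [1])) ([], [])
      = (PySem.List.dedup syms,
         (PySem.List.dedup syms).map (fun s => (PySem.List.count syms s : Int))) := by
  induction syms using List.reverseRecOn with
  | nil => rfl
  | append_singleton p s ih =>
    rw [List.foldl_append, ih]
    simp only [List.foldl_cons, List.foldl_nil]
    have hd : PySem.List.dedup (p ++ [s]) =
        if s ∈ p then PySem.List.dedup p else PySem.List.dedup p ++ [s] := by
      rw [PySem.List.dedup_eq_ofList, PySem.Set.ofList_eq_foldl, List.foldl_append,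
          ← PySem.Set.ofList_eq_foldl, ← PySem.List.dedup_eq_ofList]
      simp only [List.foldl_cons, List.foldl_nil, PySem.Set.add, PySem.Set.contains]
      by_cases hs : s ∈ p <;> simp [hs]
    by_cases hs : s ∈ p
    · have hmem' : s ∈ PySem.List.dedup p := (PySem.List.mem_dedup p s).2 hs
      rw [hd, if_pos hs]
      simp only [hmem', if_true]
      have hsome : (PySem.List.index? (PySem.List.dedup p) s).isSome :=
        (PySem.List.index?_isSome_iff _ s).2 hmem'
      obtain ⟨k, hk⟩ := Option.isSome_iff_exists.mp hsome
      rw [hk]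
      obtain ⟨hklt, hkeq, -⟩ := PySem.List.getElem_of_index?_eq_some hk
      have hnd := PySem.List.nodup_dedup p
      have hklt' : k < (List.map (fun s => (PySem.List.count p s : Int))
          (PySem.List.dedup p)).length := by simpa using hklt
      simp only [Prod.mk.injEq, true_and]
      rw [List.getD_eq_getElem _ _ hklt', List.getElem_map, hkeq]
      exact set_count_map p s (PySem.List.dedup p) k hnd hklt hkeq
    · have hmem' : s ∉ PySem.List.dedup p := fun h => hs ((PySem.List.mem_dedup p s).1 h)
      rw [hd, if_neg hs]
      simp only [hmem', if_false]
      simp only [Prod.mk.injEq, List.map_append, List.map_cons, List.map_nil, true_and]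
      have h1 : (PySem.List.count (p ++ [s]) s : Int) = 1 := by
        simp [PySem.List.count_eq, List.count_append,
          List.count_eq_zero_of_not_mem hs]
      have h2 : List.map (fun t => (PySem.List.count p t : Int)) (PySem.List.dedup p)
          = List.map (fun t => (PySem.List.count (p ++ [s]) t : Int)) (PySem.List.dedup p) := by
        apply List.map_congr_left
        intro t ht
        have htp : t ∈ p := (PySem.List.mem_dedup p t).1 ht
        have hts : ¬ s = t := fun h => hs (h ▸ htp)
        simp [PySem.List.count_eq, List.count_append, hts]
      rw [h2, h1]

-- The fused loop driven through a symbol map φ of the indices.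
theorem fused_loop_eq' (φ : Int → String) (idxs : List Int) :
    idxs.foldl (fun st index =>
        if φ index ∈ st.1 then
          match PySem.List.index? st.1 (φ index) with
          | some i => (st.1, st.2.set i (st.2.getD i 0 + 1))
          | none => st
        else (st.1 ++ [φ index], st.2 ++ [1])) ([], [])
      = (PySem.List.dedup (idxs.map φ),
         (PySem.List.dedup (idxs.map φ)).map
           (fun s => (PySem.List.count (idxs.map φ) s : Int))) := by
  rw [← fused_loop_eq (idxs.map φ)]
  exact (List.foldl_map (f := φ)
    (g := fun (st : List String × List Int) (signo : String) =>
      if signo ∈ st.1 then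
        match PySem.List.index? st.1 signo with
        | some i => (st.1, st.2.set i (st.2.getD i 0 + 1))
        | none => st
      else (st.1 ++ [signo], st.2 ++ [1]))
    (l := idxs) (init := (([], []) : List String × List Int))).symm

-- ===== VERDICT (by name: the statement is the Claim_ definition above) =====
theorem getTablaFrequencias_spec : Claim_equal_getTablaFrequencias := by
  intro mensaje n _hdom hn
  have hn0 : (0 : Int) ≤ n := by
    unfold Pre_getTablaFrequencias at hn; omega
  unfold Spec_getTablaFrequencias
  cases h : PySem.List.slice? (PySem.List.pyRange 0 (PySem.Str.len mensaje) 1) none none n with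
  | none => simp only [getTablaFrequencias, getTablaFrequencias_alt, h]
  | some idxs =>
    have hmem : ∀ i ∈ idxs, (0 : Int) ≤ i := by
      intro i hi
      have hi' : i ∈ PySem.List.pyRange 0 (PySem.Str.len mensaje) 1 := by
        unfold PySem.List.slice? at h
        split at h
        · exact absurd h (by simp)
        · simp only [Option.some.injEq] at h
          subst h
          simp only [List.mem_filterMap] at hi
          obtain ⟨k, -, hk⟩ := hi
          exact List.mem_of_getElem? hk
      exact ((PySem.List.mem_pyRange_one).1 hi').1
    simp only [getTablaFrequencias, getTablaFrequencias_alt, h]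
    rw [PySem.List.foldl_congr_mem idxs _
          (fun st index =>
            if PySem.Str.slice mensaje (some index) (some (index + n)) ∈ st.1 then
              match PySem.List.index? st.1
                  (PySem.Str.slice mensaje (some index) (some (index + n))) with
              | some i => (st.1, st.2.set i (st.2.getD i 0 + 1))
              | none => st
            else (st.1 ++ [PySem.Str.slice mensaje (some index) (some (index + n))],
                  st.2 ++ [1]))
          ([], [])
          (by
            intro acc x hx
            simp only [getTuple_eq_slice mensaje n x (hmem x hx) hn0])]
    rw [dedup_pass_eq]
    exact fused_loop_eq' (fun i => PySem.Str.slice mensaje (some i) (some (i + n))) idxs
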